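-- pv_equiv track=rewrite | github.com/efocht/aggmon | src/aggmon/agg_component.py | component_key
-- ===== SOURCE A (Python) =====
-- def component_key(keys, kwds):
--     keys = keys.split(":")
--     key = []
--     for k in keys:
--         if k in kwds:
--             key.append(kwds[k])
--         elif len(key) > 0:
--             return ":".join(key) + ":"
--     return ":".join(key)
-- ===== SOURCE B (Python) =====
-- def component_key(keys, kwds):
--     ks = keys.split(":")
--     n = len(ks)
--     i = 0
--     while i < n and ks[i] not in kwds:
--         i += 1
--     j = i
--     while j < n and ks[j] in kwds:
--         j += 1
--     res = ":".join(kwds[k] for k in ks[i:j])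
--     return res + ":" if j < n else res
-- ===== Notes on version B (the rewrite author's own statement) =====
-- stated objective: alternative
-- what changed: Replaced A's single branchy accumulator loop with early return by a two-phase scan: first skip the leading absent keys, then collect the maximal present run, and decide the trailing colon by comparing the collected run's length with the remaining suffix's length.
import Mathlib
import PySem

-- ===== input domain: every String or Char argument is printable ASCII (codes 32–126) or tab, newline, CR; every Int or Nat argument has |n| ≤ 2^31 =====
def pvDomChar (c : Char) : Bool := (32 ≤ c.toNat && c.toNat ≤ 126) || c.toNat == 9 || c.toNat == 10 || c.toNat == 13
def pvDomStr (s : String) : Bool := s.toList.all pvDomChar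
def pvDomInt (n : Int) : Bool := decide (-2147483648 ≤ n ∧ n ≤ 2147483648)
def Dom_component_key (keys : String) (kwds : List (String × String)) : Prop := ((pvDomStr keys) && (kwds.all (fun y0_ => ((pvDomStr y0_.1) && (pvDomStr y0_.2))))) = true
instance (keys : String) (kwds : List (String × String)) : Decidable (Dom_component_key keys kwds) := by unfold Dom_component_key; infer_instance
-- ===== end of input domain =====

-- B restructures A's single loop into a skip phase, a collect phase and a length comparison; same cost, different decomposition.

-- ===== PORT A =====
-- A's for-loop over the split keys, with the accumulator 'key' and the early return
def componentKeyGoA (kwds : List (String × String)) (key : List String) : List String → String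
  | [] => PySem.Str.join ":" key
  | k :: rest =>
    if (List.lookup k kwds).isSome then
      componentKeyGoA kwds (key ++ [(List.lookup k kwds).getD ""]) rest
    else if key.length > 0 then
      PySem.Str.join ":" key ++ ":"
    else
      componentKeyGoA kwds key rest

def component_key (keys : String) (kwds : List (String × String)) : String :=
  componentKeyGoA kwds [] ((PySem.Str.split? keys ":").getD [keys])

-- ===== PORT B =====
-- B's first while loop: advance past the leading keys that are absent from kwds
def bSkipAbsent (kwds : List (String × String)) : List String → List String
  | [] => []
  | k :: rest => if (List.lookup k kwds).isSome then k :: rest else bSkipAbsent kwds rest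

-- B's second while loop: the maximal leading run of present keys
def bTakePresent (kwds : List (String × String)) : List String → List String
  | [] => []
  | k :: rest => if (List.lookup k kwds).isSome then k :: bTakePresent kwds rest else []

def component_key_alt (keys : String) (kwds : List (String × String)) : String :=
  let ks := (PySem.Str.split? keys ":").getD [keys]
  let suffix := bSkipAbsent kwds ks
  let collected := bTakePresent kwds suffix
  let res := PySem.Str.join ":" (collected.map (fun k => (List.lookup k kwds).getD ""))
  if collected.length < suffix.length then res ++ ":" else res

-- ===== PRECONDITION & SPEC =====
def Spec_component_key (keys : String) (kwds : List (String × String)) (out : String) : Prop := out = component_key_alt keys kwds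
instance (keys : String) (kwds : List (String × String)) (out : String) : Decidable (Spec_component_key keys kwds out) := by unfold Spec_component_key; infer_instance

-- ===== CLAIM (what is proved, stated in full; the proofs are below) =====
def Claim_equal_component_key : Prop := ∀ (keys : String) (kwds : List (String × String)), Dom_component_key keys kwds → Spec_component_key keys kwds (component_key keys kwds)

-- ===== LEMMAS AND PROOFS =====

-- With an empty accumulator, A's loop just skips absent keys: it agrees with itself on the skipped suffix.
theorem goA_nil_skip (kwds : List (String × String)) (ks : List String) :
    componentKeyGoA kwds [] ks = componentKeyGoA kwds [] (bSkipAbsent kwds ks) := by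
  induction ks with
  | nil => rfl
  | cons k rest ih =>
    by_cases h : (List.lookup k kwds).isSome
    · simp [componentKeyGoA, bSkipAbsent, h]
    · simp only [componentKeyGoA, bSkipAbsent, h, if_false, List.length_nil, gt_iff_lt,
        Nat.lt_irrefl, Bool.false_eq_true]
      simpa using ih

-- With a nonempty accumulator, A's loop collects exactly the maximal present run and
-- appends ":" iff an absent key cut that run short.
theorem goA_collect (kwds : List (String × String)) (ks : List String) :
    ∀ acc : List String, acc ≠ [] →
    componentKeyGoA kwds acc ks =
      (if (bTakePresent kwds ks).length < ks.length then
        PySem.Str.join ":" (acc ++ (bTakePresent kwds ks).map (fun k => (List.lookup k kwds).getD "")) ++ ":"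
      else
        PySem.Str.join ":" (acc ++ (bTakePresent kwds ks).map (fun k => (List.lookup k kwds).getD ""))) := by
  induction ks with
  | nil => intro acc _; simp [componentKeyGoA, bTakePresent]
  | cons k rest ih =>
    intro acc hacc
    by_cases h : (List.lookup k kwds).isSome
    · have := ih (acc ++ [(List.lookup k kwds).getD ""]) (by simp)
      simp only [componentKeyGoA, h, if_true, this, bTakePresent, List.length_cons, List.map_cons]
      rw [List.append_assoc]
      simp
    · have hlen : acc.length > 0 := by
        cases acc with
        | nil => exact absurd rfl hacc
        | cons a t => simp
      simp [componentKeyGoA, h, hlen, bTakePresent]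

-- bSkipAbsent returns [] or a list whose head is present.
theorem bSkip_head (kwds : List (String × String)) (ks : List String) :
    bSkipAbsent kwds ks = [] ∨
      ∃ k rest, bSkipAbsent kwds ks = k :: rest ∧ (List.lookup k kwds).isSome := by
  induction ks with
  | nil => exact Or.inl rfl
  | cons k rest ih =>
    by_cases h : (List.lookup k kwds).isSome
    · exact Or.inr ⟨k, rest, by simp [bSkipAbsent, h], h⟩
    · simpa [bSkipAbsent, h] using ih

-- ===== VERDICT (by name: the statement is the Claim_ definition above) =====
theorem component_key_spec : Claim_equal_component_key := by
  intro keys kwds _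
  unfold Spec_component_key component_key component_key_alt
  dsimp only
  generalize (PySem.Str.split? keys ":").getD [keys] = ks
  rw [goA_nil_skip]
  rcases bSkip_head kwds ks with h | ⟨k, rest, h, hk⟩
  · rw [h]; simp [componentKeyGoA, bTakePresent]
  · rw [h]
    simp only [componentKeyGoA, hk, if_true, List.nil_append]
    rw [goA_collect kwds rest [(List.lookup k kwds).getD ""] (by simp)]
    simp [bTakePresent, hk]
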